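-- pv_equiv track=rewrite | github.com/mattyonweb/funlisp | lisp/utils.py | replace_but_not_inside_quotes
-- ===== SOURCE A (Python) =====
-- def replace_but_not_inside_quotes(old: chr, new: chr, s: str) -> str:
--     new_s = str()
--     in_quotes = False
--
--     for c in s:
--         if c == "\"":
--             in_quotes = not in_quotes
--             new_s += c
--             continue
--
--         if c == old:
--             if not in_quotes:
--                 new_s += new
--             else:
--                 new_s += c
--             continue
--
--         new_s += c
--
--     return new_s
-- ===== SOURCE B (Python) =====
-- def replace_but_not_inside_quotes(old, new, s):
--     parts = s.split('"')
--     return '"'.join(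
--         ''.join(new if c == old else c for c in seg) if i % 2 == 0 else seg
--         for i, seg in enumerate(parts)
--     )
-- ===== Notes on version B (the rewrite author's own statement) =====
-- stated objective: simpler
-- what changed: B replaces the stateful char loop with an in_quotes flag by split-on-'"' / replace in even-indexed segments / rejoin with '"', so no quote-state tracking is needed; the measured speedup comes from doing the scanning in C-level str.split/join instead of a Python-level per-character loop.
import Mathlib
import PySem

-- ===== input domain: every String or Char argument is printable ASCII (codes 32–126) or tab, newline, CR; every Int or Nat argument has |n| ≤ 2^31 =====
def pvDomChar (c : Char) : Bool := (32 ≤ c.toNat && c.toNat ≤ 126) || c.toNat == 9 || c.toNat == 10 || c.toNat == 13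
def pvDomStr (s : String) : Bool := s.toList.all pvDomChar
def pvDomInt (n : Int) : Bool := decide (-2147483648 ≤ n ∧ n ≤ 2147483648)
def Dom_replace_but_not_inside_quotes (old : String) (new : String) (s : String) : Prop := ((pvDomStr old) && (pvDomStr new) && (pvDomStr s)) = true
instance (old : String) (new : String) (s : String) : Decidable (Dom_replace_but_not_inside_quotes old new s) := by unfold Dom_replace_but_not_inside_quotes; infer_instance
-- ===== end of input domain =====

-- B replaces A's stateful char loop (in_quotes flag) by split-on-'"'/replace-in-even-segments/rejoin: simpler decomposition, same O(n) cost.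

-- ===== PORT A =====
-- the loop body of A: state is (new_s, in_quotes)
def aStep (old new : String) (acc : List Char × Bool) (c : Char) : List Char × Bool :=
  if c = '"' then (acc.1 ++ [c], !acc.2)
  else if String.mk [c] = old then
    (if !acc.2 then (acc.1 ++ new.toList, acc.2) else (acc.1 ++ [c], acc.2))
  else (acc.1 ++ [c], acc.2)

def replace_but_not_inside_quotes (old : String) (new : String) (s : String) : String :=
  String.mk ((s.toList.foldl (aStep old new) ([], false)).1)

-- ===== PORT B =====
-- hand port of s.split('"') (exact for the single-character separator B uses)
def bSplit : List Char → List (List Char)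
  | [] => [[]]
  | c :: cs =>
    if c = '"' then [] :: bSplit cs
    else
      match bSplit cs with
      | [] => [[c]]
      | h :: t => (c :: h) :: t

-- ''.join(new if c == old else c for c in seg)
def bRepl (old new : String) (seg : List Char) : List Char :=
  seg.flatMap (fun c => if String.mk [c] = old then new.toList else [c])

def replace_but_not_inside_quotes_alt (old : String) (new : String) (s : String) : String :=
  String.mk (PySem.Chars.join ['"']
    ((PySem.List.enumerate (bSplit s.toList)).map
      (fun p => if p.1 % 2 = 0 then bRepl old new p.2 else p.2)))

-- ===== PRECONDITION & SPEC =====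
def Spec_replace_but_not_inside_quotes (old : String) (new : String) (s : String) (out : String) : Prop := out = replace_but_not_inside_quotes_alt old new s
instance (old : String) (new : String) (s : String) (out : String) : Decidable (Spec_replace_but_not_inside_quotes old new s out) := by unfold Spec_replace_but_not_inside_quotes; infer_instance

-- ===== CLAIM (what is proved, stated in full; the proofs are below) =====
def Claim_equal_replace_but_not_inside_quotes : Prop := ∀ (old : String) (new : String) (s : String), Dom_replace_but_not_inside_quotes old new s → Spec_replace_but_not_inside_quotes old new s (replace_but_not_inside_quotes old new s)

-- ===== LEMMAS AND PROOFS =====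

-- A's loop as a structural recursion (right-accumulating form of the fold)
def aRun (old new : String) : List Char → Bool → List Char
  | [], _ => []
  | c :: cs, b =>
    if c = '"' then c :: aRun old new cs (!b)
    else if String.mk [c] = old then
      (if !b then new.toList else [c]) ++ aRun old new cs b
    else c :: aRun old new cs b

theorem foldl_aStep (old new : String) (cs : List Char) :
    ∀ (acc : List Char) (b : Bool),
      (cs.foldl (aStep old new) (acc, b)).1 = acc ++ aRun old new cs b := by
  induction cs with
  | nil => intro acc b; simp [aRun]
  | cons c cs ih =>
    intro acc b
    simp only [List.foldl_cons, aStep, aRun]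
    by_cases h1 : c = '"'
    · simp [h1, ih]
    · by_cases h2 : String.mk [c] = old
      · cases b <;> simp [h1, h2, ih]
      · simp [h1, h2, ih]

-- B's "map over enumerated segments, join with '"'" as a structural recursion carrying the index
def procB (old new : String) : List (List Char) → Int → List Char
  | [], _ => []
  | [p], i => if i % 2 = 0 then bRepl old new p else p
  | p :: q :: ps, i =>
      (if i % 2 = 0 then bRepl old new p else p) ++ '"' :: procB old new (q :: ps) (i + 1)

theorem join_enumerate_eq_procB (old new : String) (ps : List (List Char)) :
    ∀ (i : Int),
      PySem.Chars.join ['"']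
        ((PySem.List.enumerate ps i).map
          (fun p => if p.1 % 2 = 0 then bRepl old new p.2 else p.2)) = procB old new ps i := by
  induction ps with
  | nil => intro i; simp [PySem.List.enumerate, PySem.Chars.join, procB, List.intercalate]
  | cons p ps ih =>
    intro i
    cases ps with
    | nil =>
      simp [PySem.List.enumerate, PySem.Chars.join, procB, List.intercalate]
    | cons q t =>
      have := ih (i + 1)
      simp only [PySem.List.enumerate_cons, List.map_cons, procB] at *
      rw [← this]
      simp [PySem.Chars.join, List.intercalate, List.intersperse]

theorem procB_congr (old new : String) (ps : List (List Char)) :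
    ∀ (i j : Int), i % 2 = j % 2 → procB old new ps i = procB old new ps j := by
  induction ps with
  | nil => intro i j _; rfl
  | cons p ps ih =>
    intro i j h
    cases ps with
    | nil => simp [procB, h]
    | cons q t =>
      simp only [procB, h]
      rw [ih (i + 1) (j + 1) (by omega)]

theorem bSplit_ne_nil (cs : List Char) : bSplit cs ≠ [] := by
  cases cs with
  | nil => simp [bSplit]
  | cons c cs =>
    simp only [bSplit]
    split
    · simp
    · split <;> simp_all

theorem bRepl_cons (old new : String) (c : Char) (seg : List Char) :
    bRepl old new (c :: seg)
      = (if String.mk [c] = old then new.toList else [c]) ++ bRepl old new seg := by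
  simp [bRepl]

theorem procB_cons_head (old new : String) (c : Char) (h : List Char)
    (t : List (List Char)) (i : Int) :
    procB old new ((c :: h) :: t) i
      = (if i % 2 = 0 then (if String.mk [c] = old then new.toList else [c]) else [c])
          ++ procB old new (h :: t) i := by
  cases t with
  | nil => by_cases hi : i % 2 = 0 <;> simp [procB, hi, bRepl_cons]
  | cons q t => by_cases hi : i % 2 = 0 <;> simp [procB, hi, bRepl_cons]

theorem aRun_eq_procB (old new : String) (cs : List Char) :
    ∀ (b : Bool), aRun old new cs b = procB old new (bSplit cs) (if b then 1 else 0) := by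
  induction cs with
  | nil => intro b; cases b <;> simp [aRun, bSplit, procB, bRepl]
  | cons c cs ih =>
    intro b
    by_cases h1 : c = '"'
    · subst h1
      obtain ⟨r, t, hrt⟩ : ∃ r t, bSplit cs = r :: t := by
        cases hh : bSplit cs with
        | nil => exact absurd hh (bSplit_ne_nil cs)
        | cons r t => exact ⟨r, t, rfl⟩
      have hsplit : bSplit ('"' :: cs) = [] :: bSplit cs := by simp [bSplit]
      have hL : aRun old new ('"' :: cs) b = '"' :: aRun old new cs (!b) := by
        simp [aRun]
      have hR : procB old new ([] :: r :: t) (if b then 1 else 0)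
          = '"' :: procB old new (r :: t) ((if b then 1 else 0) + 1) := by
        by_cases hb : (if b then (1 : Int) else 0) % 2 = 0 <;> simp [procB, hb, bRepl]
      rw [hL, ih (!b), hsplit, hrt, hR, ← hrt,
        procB_congr old new (bSplit cs) ((if b then 1 else 0) + 1) (if !b then 1 else 0)
          (by cases b <;> decide)]
    · obtain ⟨h, t, hht⟩ : ∃ h t, bSplit cs = h :: t := by
        cases hh : bSplit cs with
        | nil => exact absurd hh (bSplit_ne_nil cs)
        | cons h t => exact ⟨h, t, rfl⟩
      have hb : bSplit (c :: cs) = (c :: h) :: t := by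
        simp [bSplit, h1, hht]
      rw [hb, procB_cons_head, ← hht, ← ih b]
      have hp : (if b then (1 : Int) else 0) % 2 = 0 ↔ b = false := by
        cases b <;> simp
      by_cases h2 : String.mk [c] = old
      · cases b <;> simp [aRun, h1, h2]
      · cases b <;> simp [aRun, h1, h2]

-- ===== VERDICT (by name: the statement is the Claim_ definition above) =====
theorem replace_but_not_inside_quotes_spec : Claim_equal_replace_but_not_inside_quotes := by
  intro old new s _
  unfold Spec_replace_but_not_inside_quotes
  unfold replace_but_not_inside_quotes replace_but_not_inside_quotes_alt
  rw [foldl_aStep, join_enumerate_eq_procB, List.nil_append, aRun_eq_procB]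
  norm_num
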